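-- pv_equiv track=rewrite | github.com/Keshavr57/aris_buildx_malaichap | core/hard_enforcer.py | fix_decide_response
-- ===== SOURCE A (Python) =====
-- def fix_decide_response(response: str) -> str:
--     """Remove Options section from DECIDE responses."""
--     # Remove "Options:" section
--     lines = response.split('\n')
--     filtered_lines = []
--     skip_options = False
--
--     for line in lines:
--         if line.strip().startswith("**Options:**"):
--             skip_options = True
--             continue
--         elif line.strip().startswith("**") and skip_options:
--             skip_options = False
--             filtered_lines.append(line)
--         elif not skip_options:
--             filtered_lines.append(line)
--
--     return '\n'.join(filtered_lines)
-- ===== SOURCE B (Python) =====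
-- def fix_decide_response(response: str) -> str:
--     """Remove Options section: stateless per-line filter.
--
--     Classify each line (Options header / other header / plain); a line is kept
--     iff it is a non-Options header, or a plain line whose nearest preceding
--     header line (looking back) is not an Options header.
--     """
--     lines = response.split('\n')
--
--     def kind(line):
--         s = line.strip()
--         if s.startswith("**Options:**"):
--             return 2
--         if s.startswith("**"):
--             return 1
--         return 0
--
--     kinds = [kind(l) for l in lines]
--
--     def kept(i):
--         k = kinds[i]
--         if k == 2:
--             return False
--         if k == 1:
--             return True
--         for p in reversed(kinds[:i]):
--             if p:
--                 return p != 2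
--         return True
--
--     return '\n'.join(lines[i] for i in range(len(lines)) if kept(i))
-- ===== Notes on version B (the rewrite author's own statement) =====
-- stated objective: alternative
-- what changed: Replaces A's stateful single pass with a skip flag by a stateless per-line filter: each line is classified as Options header / other header / plain, and a plain line is kept iff its nearest preceding header (found by a backward lookback) is not an Options header.
import Mathlib
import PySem

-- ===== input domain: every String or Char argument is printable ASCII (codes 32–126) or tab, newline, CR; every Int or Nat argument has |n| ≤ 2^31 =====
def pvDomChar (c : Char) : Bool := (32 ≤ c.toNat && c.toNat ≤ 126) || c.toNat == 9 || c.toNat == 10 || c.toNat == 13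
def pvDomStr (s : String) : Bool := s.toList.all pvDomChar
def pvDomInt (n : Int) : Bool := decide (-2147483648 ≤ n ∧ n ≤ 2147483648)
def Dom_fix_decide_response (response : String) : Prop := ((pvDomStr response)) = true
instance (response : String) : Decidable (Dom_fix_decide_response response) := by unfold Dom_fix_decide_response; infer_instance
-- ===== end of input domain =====

-- B replaces A's stateful skip-flag pass by a stateless per-line filter with a backward
-- lookback for the nearest preceding header; alternative decomposition, no speed claim.

-- ===== PORT A =====
-- the for-loop with the skip_options flag, as structural recursion over the lines
def pvALoop (lines : List String) (skip : Bool) : List String :=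
  match lines with
  | [] => []
  | l :: rest =>
    if PySem.Str.startswith (PySem.Str.strip l) "**Options:**" then
      pvALoop rest true
    else if PySem.Str.startswith (PySem.Str.strip l) "**" && skip then
      l :: pvALoop rest false
    else if !skip then
      l :: pvALoop rest skip
    else
      pvALoop rest skip

def fix_decide_response (response : String) : String :=
  -- sep "\n" is nonempty, so split? is always some; getD [] only makes this total
  let lines := (PySem.Str.split? response "\n").getD []
  PySem.Str.join "\n" (pvALoop lines false)

-- ===== PORT B =====
-- def kind(line): classify a line
def pvKind (l : String) : Nat :=
  let s := PySem.Str.strip l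
  if PySem.Str.startswith s "**Options:**" then 2
  else if PySem.Str.startswith s "**" then 1
  else 0

-- the 'for p in reversed(kinds[:i]): if p: return p != 2' lookback (argument already reversed)
def pvLookback (pre : List Nat) : Bool :=
  match pre with
  | [] => true
  | p :: rest => if p ≠ 0 then decide (p ≠ 2) else pvLookback rest

-- def kept(i); kinds[i] as getD is exact here: every i produced by range(len(lines)) is in range
def pvKept (kinds : List Nat) (i : Nat) : Bool :=
  let k := kinds.getD i 0
  if k == 2 then false
  else if k == 1 then true
  else pvLookback (kinds.take i).reverse

def fix_decide_response_alt (response : String) : String :=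
  let lines := (PySem.Str.split? response "\n").getD []
  let kinds := lines.map pvKind
  -- '\n'.join(lines[i] for i in range(len(lines)) if kept(i)); lines[i] in range, getD exact
  PySem.Str.join "\n" (((List.range lines.length).filter (fun i => pvKept kinds i)).map
    (fun i => lines.getD i ""))

-- ===== PRECONDITION & SPEC =====
def Spec_fix_decide_response (response : String) (out : String) : Prop := out = fix_decide_response_alt response
instance (response : String) (out : String) : Decidable (Spec_fix_decide_response response out) := by unfold Spec_fix_decide_response; infer_instance

-- ===== CLAIM (what is proved, stated in full; the proofs are below) =====
def Claim_equal_fix_decide_response : Prop := ∀ (response : String), Dom_fix_decide_response response → Spec_fix_decide_response response (fix_decide_response response)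

-- ===== LEMMAS AND PROOFS =====
theorem pvKinds_take (pref : List String) (suf : List String) :
    (((pref ++ suf).map pvKind).take pref.length) = pref.map pvKind := by
  rw [List.map_append]
  simp

theorem pvKinds_getD (pref : List String) (l : String) (rest : List String) :
    ((pref ++ l :: rest).map pvKind).getD pref.length 0 = pvKind l := by
  rw [List.map_append]
  simp [List.getD_eq_getElem?_getD]

theorem pvLines_getD (pref : List String) (l : String) (rest : List String) :
    (pref ++ l :: rest).getD pref.length "" = l := by
  simp [List.getD_eq_getElem?_getD]

-- joint invariant: the filtered index scan over a suffix equals A's loop with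
-- skip = !(lookback over the reversed prefix kinds)
theorem pvMain_ind : ∀ (suf pref : List String),
    ((List.range' pref.length suf.length).filter
        (fun i => pvKept ((pref ++ suf).map pvKind) i)).map (fun i => (pref ++ suf).getD i "")
    = pvALoop suf (!pvLookback ((pref.map pvKind).reverse)) := by
  intro suf
  induction suf with
  | nil => intro pref; simp [pvALoop]
  | cons l rest ih =>
    intro pref
    have hassoc : pref ++ l :: rest = (pref ++ [l]) ++ rest := by simp
    have ihl := ih (pref ++ [l])
    rw [← hassoc, (by simp : (pref ++ [l]).length = pref.length + 1),
        (by simp : (((pref ++ [l]).map pvKind).reverse) = pvKind l :: (pref.map pvKind).reverse)]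
      at ihl
    have hkept : pvKept ((pref ++ l :: rest).map pvKind) pref.length
        = (if pvKind l == 2 then false else if pvKind l == 1 then true
           else pvLookback ((pref.map pvKind).reverse)) := by
      unfold pvKept
      rw [pvKinds_getD, pvKinds_take pref (l :: rest)]
    rw [List.length_cons, List.range'_succ, List.filter_cons, hkept]
    by_cases hopt : PySem.Str.startswith (PySem.Str.strip l) "**Options:**" = true
    · -- Options header: dropped on both sides; skip becomes true
      have hk : pvKind l = 2 := by unfold pvKind; rw [if_pos hopt]
      rw [hk] at ihl ⊢
      simp only [pvLookback, ne_eq, OfNat.ofNat_ne_zero, not_false_eq_true, if_true] at ihl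
      rw [pvALoop]
      simp only [hopt, if_true, show ((2:Nat) == 2) = true from rfl, Bool.false_eq_true]
      simpa using ihl
    · by_cases hstar : PySem.Str.startswith (PySem.Str.strip l) "**" = true
      · -- other header: kept on both sides; skip becomes false
        have hk : pvKind l = 1 := by unfold pvKind; rw [if_neg hopt, if_pos hstar]
        rw [hk] at ihl ⊢
        simp only [pvLookback, ne_eq, one_ne_zero, not_false_eq_true, if_true] at ihl
        simp only [show ((1:Nat) == 2) = false from rfl, show ((1:Nat) == 1) = true from rfl,
          Bool.false_eq_true, if_false, if_true]
        rw [List.map_cons, pvLines_getD]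
        rw [pvALoop]
        simp only [hopt, Bool.false_eq_true, if_false]
        simp only [show (decide ¬(1:Nat) = 2) = true from rfl, Bool.not_true] at ihl
        rw [ihl]
        cases h : pvLookback ((pref.map pvKind).reverse)
        · rw [hstar]; simp
        · simp
      · -- plain line: kept iff lookback keeps (= A's not-skip); seed unchanged
        have hk : pvKind l = 0 := by unfold pvKind; rw [if_neg hopt, if_neg hstar]
        rw [hk] at ihl ⊢
        simp only [pvLookback, ne_eq, not_true, if_false] at ihl
        simp only [show ((0:Nat) == 2) = false from rfl, show ((0:Nat) == 1) = false from rfl,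
          Bool.false_eq_true, if_false]
        rw [pvALoop]
        simp only [hopt, hstar, Bool.false_eq_true, if_false, Bool.false_and]
        cases h : pvLookback ((pref.map pvKind).reverse)
        · -- skip = true: line dropped
          rw [h] at ihl
          simp only [if_false, Bool.false_eq_true]
          simpa [h] using ihl
        · -- skip = false: line kept
          rw [h] at ihl
          simp only [if_true]
          rw [List.map_cons, pvLines_getD]
          simpa [h] using ihl

-- ===== VERDICT (by name: the statement is the Claim_ definition above) =====
theorem fix_decide_response_spec : Claim_equal_fix_decide_response := by
  intro response _
  unfold Spec_fix_decide_response
  simp only [fix_decide_response, fix_decide_response_alt]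
  have h := pvMain_ind ((PySem.Str.split? response "\n").getD []) []
  simp only [List.nil_append, List.length_nil, List.map_nil, List.reverse_nil, pvLookback,
    Bool.not_true] at h
  rw [List.range_eq_range', h]
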